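-- pv_equiv track=rewrite | github.com/glebzhelezov/birdsongs | analysis/boat_submission.py | burst_configs
-- ===== SOURCE A (Python) =====
-- from itertools import combinations_with_replacement
-- from collections import Counter
--
-- def burst_configs(n_edges, max_bursts, min_bursts=0):
--     """Generator which returns locations of bursts.
--
--     Returns a list of this sort: [(edge #, # of bursts on edge), ..., (edge #, # bursts)]. List only
--     includes tuples with nonzero numbers of bursts.
--     """
--
--     for n_bursts in range(min_bursts, max_bursts + 1):
--         # Can run this in parallel
--         for individual_bursts in combinations_with_replacement(
--             range(n_edges), n_bursts
--         ):
--             burst_locations = []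
--
--             # This is probably the worst way to generate a list of the form
--             # [(edge_index_1, n_bursts_1), ..., (edge_index_k, n_bursts_k)]
--             for burst in Counter(individual_bursts).items():
--                 burst_locations.append((burst[0], burst[1]))
--
--             # Yield a list of all the burst locations in this configuration.
--             yield burst_locations
-- ===== SOURCE B (Python) =====
-- def burst_configs(n_edges, max_bursts, min_bursts=0):
--     """Generator yielding burst configurations as [(edge, count), ...] lists
--     (stars-and-bars recursion over the first edge with a nonzero count)."""
--
--     def go(edge, rem):
--         if rem == 0:
--             yield []
--             return
--         # choose the first edge e >= edge that carries bursts, count high->low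
--         for e in range(edge, n_edges):
--             for c in range(rem, 0, -1):
--                 for tail in go(e + 1, rem - c):
--                     yield [(e, c)] + tail
--
--     for n_bursts in range(min_bursts, max_bursts + 1):
--         yield from go(0, n_bursts)
-- ===== Notes on version B (the rewrite author's own statement) =====
-- stated objective: alternative
-- what changed: Replaces combinations_with_replacement over edge tuples followed by a Counter pass per tuple with a direct stars-and-bars recursive generator that distributes the burst count over edges, emitting (edge,count) pairs immediately (first busy edge ascending, its count descending to match lex order).
import Mathlib
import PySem

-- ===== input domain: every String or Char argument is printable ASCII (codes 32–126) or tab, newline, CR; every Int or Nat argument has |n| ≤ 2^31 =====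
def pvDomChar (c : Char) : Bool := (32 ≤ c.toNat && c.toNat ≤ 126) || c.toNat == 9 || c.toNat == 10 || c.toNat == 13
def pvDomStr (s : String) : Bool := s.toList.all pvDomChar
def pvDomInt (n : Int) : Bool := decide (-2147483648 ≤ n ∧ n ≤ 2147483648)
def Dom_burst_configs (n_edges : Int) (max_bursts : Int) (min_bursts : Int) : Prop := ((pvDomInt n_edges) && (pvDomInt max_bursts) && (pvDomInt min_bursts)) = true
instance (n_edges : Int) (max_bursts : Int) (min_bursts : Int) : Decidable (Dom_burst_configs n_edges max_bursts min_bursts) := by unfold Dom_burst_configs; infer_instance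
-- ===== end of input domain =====

-- B replaces the combinations_with_replacement + Counter enumeration by a direct stars-and-bars
-- recursion over the first edge carrying bursts (alternative decomposition, same output order).
-- Both Pythons are generators; the claim is about the list of yielded values.

-- ===== PORT A =====
-- itertools.combinations_with_replacement(pool, r): tuples as lists, in CPython's lexicographic order
def pvCWR (pool : List Int) (r : Nat) : List (List Int) :=
  match pool, r with
  | _, 0 => [[]]
  | [], _ + 1 => []
  | x :: xs, r' + 1 => ((pvCWR (x :: xs) r').map (x :: ·)) ++ pvCWR xs (r' + 1)
termination_by (r, pool.length)

-- 'n.toNat' is faithful because Pre_ keeps only runs where every n_bursts in the range is ≥ 0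
-- (combinations_with_replacement raises ValueError on a negative r).
def burst_configs (n_edges : Int) (max_bursts : Int) (min_bursts : Int) : List (List (Int × Int)) :=
  (PySem.List.pyRange min_bursts (max_bursts + 1) 1).flatMap (fun n =>
    (pvCWR (PySem.List.pyRange 0 n_edges 1) n.toNat).map (fun tup =>
      ((PySem.Dict.counter tup).items).foldl (fun acc b => acc ++ [(b.1, b.2)]) []))

-- ===== PORT B =====
def pvGo (n_edges : Int) (edge : Int) (rem : Int) : List (List (Int × Int)) :=
  if rem = 0 then [[]]
  else
    (PySem.List.pyRange edge n_edges 1).flatMap (fun e =>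
      (PySem.List.pyRange rem 0 (-1)).attach.flatMap (fun c =>
        (pvGo n_edges (e + 1) (rem - c.1)).map (fun tail => (e, c.1) :: tail)))
termination_by rem.toNat
decreasing_by
  have h := (PySem.List.mem_pyRange_neg_one).1 c.2
  omega

def burst_configs_alt (n_edges : Int) (max_bursts : Int) (min_bursts : Int) : List (List (Int × Int)) :=
  (PySem.List.pyRange min_bursts (max_bursts + 1) 1).flatMap (fun n => pvGo n_edges 0 n)

-- ===== PRECONDITION & SPEC =====
-- Pre_ excludes exactly the inputs on which A raises: combinations_with_replacement raises
-- ValueError on a negative n_bursts, reached iff min_bursts < 0 and the range is nonempty.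
def Pre_burst_configs (n_edges : Int) (max_bursts : Int) (min_bursts : Int) : Prop :=
  0 ≤ min_bursts ∨ max_bursts < min_bursts

instance (n_edges : Int) (max_bursts : Int) (min_bursts : Int) : Decidable (Pre_burst_configs n_edges max_bursts min_bursts) := by unfold Pre_burst_configs; infer_instance

def pvWitness_burst_configs : Int × Int × Int := (2, 2, 0)

def Spec_burst_configs (n_edges : Int) (max_bursts : Int) (min_bursts : Int) (out : List (List (Int × Int))) : Prop := out = burst_configs_alt n_edges max_bursts min_bursts
instance (n_edges : Int) (max_bursts : Int) (min_bursts : Int) (out : List (List (Int × Int))) : Decidable (Spec_burst_configs n_edges max_bursts min_bursts out) := by unfold Spec_burst_configs; infer_instance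

-- ===== CLAIM (what is proved, stated in full; the proofs are below) =====
def Claim_equal_burst_configs : Prop := ∀ (n_edges : Int) (max_bursts : Int) (min_bursts : Int), Dom_burst_configs n_edges max_bursts min_bursts → Pre_burst_configs n_edges max_bursts min_bursts → Spec_burst_configs n_edges max_bursts min_bursts (burst_configs n_edges max_bursts min_bursts)

-- ===== LEMMAS AND PROOFS =====

-- A's per-tuple Counter-items loop, in closed form
def pvCify (t : List Int) : List (Int × Int) :=
  (PySem.Set.ofList t).map (fun k => (k, (List.count k t : Int)))

theorem cify_eq (t : List Int) :
    ((PySem.Dict.counter t).items).foldl (fun acc b => acc ++ [(b.1, b.2)]) [] = pvCify t := by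
  rw [PySem.List.foldl_append_singleton_eq_map, PySem.Dict.items_counter]
  simp [pvCify]

-- pvGo unfold lemmas
theorem flatMap_attach' {α β : Type} (l : List α) (f : α → List β) :
    l.attach.flatMap (fun c => f c.1) = l.flatMap f := by
  rw [← List.flatMap_map (fun c : {x // x ∈ l} => c.1) f]
  simp

theorem pvGo_zero (n e : Int) : pvGo n e 0 = [[]] := by rw [pvGo]; simp

theorem pvGo_pos (n e rem : Int) (h : rem ≠ 0) :
    pvGo n e rem = (PySem.List.pyRange e n 1).flatMap (fun e' =>
      (PySem.List.pyRange rem 0 (-1)).flatMap (fun c =>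
        (pvGo n (e' + 1) (rem - c)).map (fun tail => (e', c) :: tail))) := by
  rw [pvGo, if_neg h]
  exact List.flatMap_congr (fun e' _ => flatMap_attach' (PySem.List.pyRange rem 0 (-1)) (fun c => List.map (fun tail => (e', c) :: tail) (pvGo n (e' + 1) (rem - c))))

theorem pvGo_nil (n e rem : Int) (hne : n ≤ e) (h : rem ≠ 0) : pvGo n e rem = [] := by
  rw [pvGo_pos n e rem h, PySem.List.pyRange_one_eq_nil hne]
  rfl

theorem pvCWR_mem (pool : List Int) (r : Nat) :
    ∀ t ∈ pvCWR pool r, ∀ x ∈ t, x ∈ pool := by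
  induction pool, r using pvCWR.induct with
  | case1 pool => intro t ht; simp [pvCWR] at ht; simp [ht]
  | case2 r' => intro t ht; simp [pvCWR] at ht
  | case3 x xs r' ih1 ih2 =>
      intro t ht y hy
      rw [pvCWR] at ht
      rcases List.mem_append.1 ht with h | h
      · obtain ⟨t', ht', rfl⟩ := List.mem_map.1 h
        rcases List.mem_cons.1 hy with rfl | hy'
        · exact List.mem_cons_self
        · exact ih1 t' ht' y hy'
      · exact List.mem_cons_of_mem x (ih2 t h y hy)

-- leading-count decomposition of combinations_with_replacement
theorem pvCWR_decomp (e : Int) (pool' : List Int) (r : Nat) :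
    pvCWR (e :: pool') r =
      ((List.range (r + 1)).reverse).flatMap
        (fun k => (pvCWR pool' (r - k)).map (fun t => List.replicate k e ++ t)) := by
  induction r with
  | zero => simp [pvCWR]
  | succ r' ih =>
      have hr : (List.range (r' + 1 + 1)).reverse
          = ((List.range (r' + 1)).reverse.map Nat.succ) ++ [0] := by
        rw [List.range_succ_eq_map, List.reverse_cons, List.map_reverse]
      rw [pvCWR, ih, hr, List.flatMap_append, List.flatMap_map, List.map_flatMap]
      congr 1
      · refine List.flatMap_congr (fun k _ => ?_)
        rw [List.map_map]
        simp only [Nat.succ_sub_succ]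
        refine List.map_congr_left (fun t _ => ?_)
        simp [List.replicate_succ]
      · simp

theorem set_add_cons (e x : Int) (s : List Int) (hxe : x ≠ e) :
    PySem.Set.add (e :: s) x = e :: PySem.Set.add s x := by
  simp only [PySem.Set.add, PySem.Set.contains, List.contains_cons]
  have hx : (x == e) = false := by simp [hxe]
  rw [hx]
  simp only [Bool.false_or]
  split_ifs <;> simp

theorem foldl_add_cons (e : Int) :
    ∀ (t : List Int), e ∉ t → ∀ (s : List Int),
      t.foldl PySem.Set.add (e :: s) = e :: t.foldl PySem.Set.add s := by
  intro t
  induction t with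
  | nil => intro _ s; rfl
  | cons x xs ih =>
      intro h s
      have hxe : x ≠ e := fun hh => h (hh ▸ List.mem_cons_self)
      have hnot : e ∉ xs := fun hh => h (List.mem_cons_of_mem _ hh)
      simp only [List.foldl_cons]
      rw [set_add_cons e x s hxe, ih hnot]

theorem foldl_add_replicate_self (e : Int) (k : Nat) :
    (List.replicate k e).foldl PySem.Set.add [e] = [e] := by
  induction k with
  | zero => rfl
  | succ k ih =>
      rw [List.replicate_succ, List.foldl_cons]
      have : PySem.Set.add [e] e = [e] := by simp [PySem.Set.add, PySem.Set.contains]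
      rw [this, ih]

theorem ofList_replicate_append (e : Int) (k : Nat) (t : List Int) (h : e ∉ t) :
    PySem.Set.ofList (List.replicate (k + 1) e ++ t) = e :: PySem.Set.ofList t := by
  simp only [PySem.Set.ofList, List.foldl_append]
  rw [List.replicate_succ, List.foldl_cons]
  have h1 : PySem.Set.add PySem.Set.empty e = [e] := rfl
  rw [h1, foldl_add_replicate_self]
  exact foldl_add_cons e t h PySem.Set.empty

theorem cify_replicate_append (e : Int) (k : Nat) (t : List Int) (h : e ∉ t) :
    pvCify (List.replicate (k + 1) e ++ t) = (e, ((k : Int) + 1)) :: pvCify t := by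
  unfold pvCify
  rw [ofList_replicate_append e k t h, List.map_cons]
  congr 1
  · have : List.count e t = 0 := List.count_eq_zero.2 h
    simp [List.count_append, this]
  · refine List.map_congr_left (fun x hx => ?_)
    have hxt : x ∈ t := by
      exact (PySem.Set.mem_ofList t x).1 hx
    have hxe : x ≠ e := fun hh => h (hh ▸ hxt)
    have : List.count x (List.replicate (k + 1) e) = 0 := by
      simp [List.count_replicate]
      exact fun hh => absurd hh (Ne.symm hxe)
    simp [List.count_append, this]

theorem pvMainL (n : Int) (r : Nat) : ∀ (e : Int),
    List.map pvCify (pvCWR (PySem.List.pyRange e n 1) r) = pvGo n e (r : Int) := by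
  induction r using Nat.strong_induction_on with
  | _ r IHr =>
    cases r with
    | zero =>
        intro e
        have h0 : pvCWR (PySem.List.pyRange e n 1) 0 = [[]] := by rw [pvCWR]
        rw [h0]
        simp [pvCify, pvGo_zero, PySem.Set.ofList, PySem.Set.empty]
    | succ r' =>
        have key : ∀ (m : Nat) (e : Int), (n - e).toNat ≤ m →
            List.map pvCify (pvCWR (PySem.List.pyRange e n 1) (r' + 1)) = pvGo n e ((r' : Int) + 1) := by
          intro m
          induction m with
          | zero =>
              intro e he
              have hne : n ≤ e := by omega
              rw [PySem.List.pyRange_one_eq_nil hne]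
              have hnil : pvCWR ([] : List Int) (r' + 1) = [] := by rw [pvCWR]
              rw [hnil, pvGo_nil n e _ hne (by omega)]
              rfl
          | succ m IHm =>
              intro e he
              by_cases hne : n ≤ e
              · rw [PySem.List.pyRange_one_eq_nil hne]
                have hnil : pvCWR ([] : List Int) (r' + 1) = [] := by rw [pvCWR]
                rw [hnil, pvGo_nil n e _ hne (by omega)]
                rfl
              · have hlt : e < n := by omega
                have hrem : ((r' : Int) + 1) ≠ 0 := by omega
                rw [PySem.List.pyRange_one_cons hlt, pvCWR_decomp, List.map_flatMap,
                    pvGo_pos n e _ hrem, PySem.List.pyRange_one_cons hlt, List.flatMap_cons,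
                    ← pvGo_pos n (e + 1) _ hrem]
                have hr2 : (List.range (r' + 1 + 1)).reverse
                    = ((List.range (r' + 1)).reverse.map Nat.succ) ++ [0] := by
                  rw [List.range_succ_eq_map, List.reverse_cons, List.map_reverse]
                rw [hr2, List.flatMap_append, List.flatMap_map]
                congr 1
                · -- the k ≥ 1 groups versus the c-loop of B
                  have hcr : PySem.List.pyRange ((r' : Int) + 1) 0 (-1)
                      = ((List.range (r' + 1)).reverse).map (fun k : Nat => (1 : Int) + k) := by
                    rw [PySem.List.pyRange_neg_one_eq_reverse, PySem.List.pyRange_one]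
                    have h1 : (((r' : Int) + 1 + 1) - (0 + 1)).toNat = r' + 1 := by omega
                    rw [h1, ← List.map_reverse]
                    exact List.map_congr_left (fun k _ => by norm_num)
                  rw [hcr, List.flatMap_map]
                  refine List.flatMap_congr (fun k hk => ?_)
                  have hkr : k < r' + 1 := by
                    have := List.mem_reverse.1 hk
                    exact List.mem_range.1 this
                  rw [List.map_map]
                  have hsub : r' + 1 - Nat.succ k = r' - k := by omega
                  rw [hsub]
                  have hstep : (fun t => pvCify (List.replicate (Nat.succ k) e ++ t))
                      = fun t => pvCify (List.replicate (k + 1) e ++ t) := rfl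
                  have hmap : List.map (pvCify ∘ fun t => List.replicate (Nat.succ k) e ++ t)
                        (pvCWR (PySem.List.pyRange (e + 1) n 1) (r' - k))
                      = List.map (fun t => ((e, (k : Int) + 1)) :: pvCify t)
                        (pvCWR (PySem.List.pyRange (e + 1) n 1) (r' - k)) := by
                    refine List.map_congr_left (fun t ht => ?_)
                    have hnot : e ∉ t := by
                      intro hmem
                      have := pvCWR_mem _ _ t ht e hmem
                      have := (PySem.List.mem_pyRange_one).1 this
                      omega
                    exact cify_replicate_append e k t hnot
                  rw [hmap]
                  have hc1 : ((r' : Int) + 1 - (1 + (k : Nat))) = ((r' - k : Nat) : Int) := by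
                    omega
                  rw [hc1, ← IHr (r' - k) (by omega) (e + 1), List.map_map]
                  refine List.map_congr_left (fun t _ => ?_)
                  simp [add_comm]
                · -- the k = 0 group versus the recursive call on edge + 1
                  simp only [List.flatMap_cons, List.flatMap_nil, List.append_nil,
                    List.replicate, Nat.sub_zero, List.nil_append]
                  have : (pvCify ∘ fun t => t) = pvCify := rfl
                  rw [List.map_map, this]
                  exact IHm (e + 1) (by omega)
        intro e
        have := key ((n - e).toNat) e le_rfl
        rw [this]
        norm_num

-- ===== VERDICT (by name: the statement is the Claim_ definition above) =====
theorem burst_configs_spec : Claim_equal_burst_configs := by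
  intro n_edges max_bursts min_bursts _ hpre
  unfold Spec_burst_configs burst_configs burst_configs_alt
  refine List.flatMap_congr (fun x hx => ?_)
  have hx0 : (0 : Int) ≤ x := by
    rcases hpre with h | h
    · exact le_trans h ((PySem.List.mem_pyRange_one).1 hx).1
    · exfalso
      rw [PySem.List.pyRange_one_eq_nil (by omega)] at hx
      simp at hx
  have hmap : List.map (fun tup =>
        ((PySem.Dict.counter tup).items).foldl (fun acc b => acc ++ [(b.1, b.2)]) [])
        (pvCWR (PySem.List.pyRange 0 n_edges 1) x.toNat)
      = List.map pvCify (pvCWR (PySem.List.pyRange 0 n_edges 1) x.toNat) :=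
    List.map_congr_left (fun t _ => cify_eq t)
  rw [hmap, pvMainL n_edges x.toNat 0, Int.toNat_of_nonneg hx0]
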